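-- pv_equiv track=rewrite | github.com/galax54656/chiantchiantfev2025 | romain/ajout choix joueurs.py | get_position_cliquee
-- ===== SOURCE A (Python) =====
-- carte_largeur = 50
--
-- carte_hauteur = 70
--
-- espacement = 10
--
-- def get_position_cliquee(x, y, tableau_x, tableau_y):
--     for i in range(4):
--         for j in range(4):
--             carte_x = tableau_x + j * (carte_largeur + espacement)
--             carte_y = tableau_y + i * (carte_hauteur + espacement)
--             if carte_x <= x < carte_x + carte_largeur and carte_y <= y < carte_y + carte_hauteur:
--                 return (i, j)
--     return None
-- ===== SOURCE B (Python) =====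
-- carte_largeur = 50
-- carte_hauteur = 70
-- espacement = 10
--
-- def get_position_cliquee(x, y, tableau_x, tableau_y):
--     dx = x - tableau_x
--     dy = y - tableau_y
--     if dx < 0 or dy < 0:
--         return None
--     j = dx // (carte_largeur + espacement)
--     i = dy // (carte_hauteur + espacement)
--     if i > 3 or j > 3:
--         return None
--     if dx % (carte_largeur + espacement) < carte_largeur and dy % (carte_hauteur + espacement) < carte_hauteur:
--         return (i, j)
--     return None
-- ===== Notes on version B (the rewrite author's own statement) =====
-- stated objective: simpler
-- what changed: Replaces the 4x4 nested scan over all card rectangles by direct arithmetic: one floor-division per axis computes the candidate cell and a modulus test rejects clicks in the gaps.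
import Mathlib
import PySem

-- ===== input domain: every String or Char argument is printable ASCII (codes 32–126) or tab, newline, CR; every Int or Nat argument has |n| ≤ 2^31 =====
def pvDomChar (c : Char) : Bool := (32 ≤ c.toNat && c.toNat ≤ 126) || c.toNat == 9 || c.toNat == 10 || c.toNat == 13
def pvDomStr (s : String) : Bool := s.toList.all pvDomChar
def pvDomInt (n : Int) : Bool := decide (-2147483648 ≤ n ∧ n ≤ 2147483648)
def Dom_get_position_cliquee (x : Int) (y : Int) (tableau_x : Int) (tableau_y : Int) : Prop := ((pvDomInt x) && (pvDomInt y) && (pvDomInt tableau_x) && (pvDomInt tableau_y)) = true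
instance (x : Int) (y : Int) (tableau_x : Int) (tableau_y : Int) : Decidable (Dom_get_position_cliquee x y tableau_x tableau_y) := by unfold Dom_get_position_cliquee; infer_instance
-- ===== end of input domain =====

-- B replaces A's 4x4 nested rectangle scan by O(1) arithmetic (floor-divide to find the cell, modulus to reject gap clicks); objective: simpler.


-- ===== PORT A =====
def carte_largeur : Int := 50
def carte_hauteur : Int := 70
def espacement : Int := 10

-- inner 'for j in range(4)' loop with early return
def pvLoopJ (x y tableau_x tableau_y i : Int) : List Int → Option (Int × Int)
  | [] => none
  | j :: js =>
    let carte_x := tableau_x + j * (carte_largeur + espacement)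
    let carte_y := tableau_y + i * (carte_hauteur + espacement)
    if carte_x ≤ x ∧ x < carte_x + carte_largeur ∧ carte_y ≤ y ∧ y < carte_y + carte_hauteur then
      some (i, j)
    else pvLoopJ x y tableau_x tableau_y i js

-- outer 'for i in range(4)' loop
def pvLoopI (x y tableau_x tableau_y : Int) : List Int → Option (Int × Int)
  | [] => none
  | i :: is =>
    match pvLoopJ x y tableau_x tableau_y i (PySem.List.pyRange 0 4 1) with
    | some r => some r
    | none => pvLoopI x y tableau_x tableau_y is

def get_position_cliquee (x : Int) (y : Int) (tableau_x : Int) (tableau_y : Int) : Option (Int × Int) :=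
  pvLoopI x y tableau_x tableau_y (PySem.List.pyRange 0 4 1)

-- ===== PORT B =====
def get_position_cliquee_alt (x : Int) (y : Int) (tableau_x : Int) (tableau_y : Int) : Option (Int × Int) :=
  let dx := x - tableau_x
  let dy := y - tableau_y
  if dx < 0 ∨ dy < 0 then none
  else
    let j := PySem.Int.floordiv dx (carte_largeur + espacement)
    let i := PySem.Int.floordiv dy (carte_hauteur + espacement)
    if 3 < i ∨ 3 < j then none
    else if PySem.Int.mod dx (carte_largeur + espacement) < carte_largeur ∧
            PySem.Int.mod dy (carte_hauteur + espacement) < carte_hauteur then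
      some (i, j)
    else none

-- ===== PRECONDITION & SPEC =====
def Spec_get_position_cliquee (x : Int) (y : Int) (tableau_x : Int) (tableau_y : Int) (out : Option (Int × Int)) : Prop := out = get_position_cliquee_alt x y tableau_x tableau_y
instance (x : Int) (y : Int) (tableau_x : Int) (tableau_y : Int) (out : Option (Int × Int)) : Decidable (Spec_get_position_cliquee x y tableau_x tableau_y out) := by unfold Spec_get_position_cliquee; infer_instance

-- ===== CLAIM (what is proved, stated in full; the proofs are below) =====
def Claim_equal_get_position_cliquee : Prop := ∀ (x : Int) (y : Int) (tableau_x : Int) (tableau_y : Int), Dom_get_position_cliquee x y tableau_x tableau_y → Spec_get_position_cliquee x y tableau_x tableau_y (get_position_cliquee x y tableau_x tableau_y)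

-- ===== LEMMAS AND PROOFS =====
theorem pvRange4 : PySem.List.pyRange 0 4 1 = [0, 1, 2, 3] := by decide

theorem pvLoopJ_nil (x y tx ty i : Int) : pvLoopJ x y tx ty i [] = none := rfl

theorem pvLoopJ_cons (x y tx ty i j : Int) (js : List Int) :
    pvLoopJ x y tx ty i (j :: js) =
      if tx + j * (carte_largeur + espacement) ≤ x ∧ x < tx + j * (carte_largeur + espacement) + carte_largeur ∧
         ty + i * (carte_hauteur + espacement) ≤ y ∧ y < ty + i * (carte_hauteur + espacement) + carte_hauteur then
        some (i, j)
      else pvLoopJ x y tx ty i js := rfl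

-- Option-match of a hit-or-none step collapses to an if
theorem pvOptStep (c : Prop) [Decidable c] (a : Int × Int) (rest : Option (Int × Int)) :
    (match (if c then some a else none) with
     | some r => some r
     | none => rest) = if c then some a else rest := by
  split_ifs <;> rfl

theorem pvLoopI_cons (x y tx ty i : Int) (is : List Int) :
    pvLoopI x y tx ty (i :: is) =
      match pvLoopJ x y tx ty i (PySem.List.pyRange 0 4 1) with
      | some r => some r
      | none => pvLoopI x y tx ty is := rfl

theorem pvLoopI_nil (x y tx ty : Int) : pvLoopI x y tx ty [] = none := rfl

-- one row of A's scan, characterised in closed form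
set_option maxHeartbeats 1000000 in
theorem pvRowJ (x y tx ty i : Int) :
    pvLoopJ x y tx ty i [0, 1, 2, 3] =
      if ty + i * 80 ≤ y ∧ y < ty + i * 80 + 70 ∧ tx ≤ x ∧ x - tx < 230 ∧ (x - tx) % 60 < 50 then
        some (i, (x - tx) / 60)
      else none := by
  simp only [pvLoopJ_cons, pvLoopJ_nil, carte_largeur, carte_hauteur, espacement]
  norm_num
  split_ifs <;>
    first
      | rfl
      | omega
      | (refine congrArg some (Prod.ext ?_ ?_) <;> omega)

-- ===== VERDICT (by name: the statement is the Claim_ definition above) =====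
set_option maxHeartbeats 1000000 in
theorem get_position_cliquee_spec : Claim_equal_get_position_cliquee := by
  intro x y tx ty _
  unfold Spec_get_position_cliquee get_position_cliquee get_position_cliquee_alt
  rw [pvRange4]
  simp only [pvLoopI_cons, pvLoopI_nil, pvRange4, pvRowJ, pvOptStep,
    carte_largeur, carte_hauteur, espacement,
    PySem.Int.floordiv_eq_ediv_of_pos (a := x - tx) (by norm_num : (0:Int) < 50 + 10),
    PySem.Int.floordiv_eq_ediv_of_pos (a := y - ty) (by norm_num : (0:Int) < 70 + 10),
    PySem.Int.mod_eq_emod_of_pos (a := x - tx) (by norm_num : (0:Int) < 50 + 10),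
    PySem.Int.mod_eq_emod_of_pos (a := y - ty) (by norm_num : (0:Int) < 70 + 10)]
  norm_num
  split_ifs <;>
    first
      | rfl
      | omega
      | (refine congrArg some (Prod.ext ?_ ?_) <;> omega)
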